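-- pv_equiv track=rewrite | github.com/hanhsuan/checkbox | providers/base/bin/gnome_randr_cycle.py | get_highest_resolution_info
-- ===== SOURCE A (Python) =====
-- from collections import OrderedDict
--
-- def get_highest_resolution_info(monitors: dict) -> list:
--     """
--     Get highest resolution for each monitor
--
--     :param monitors: monitors information
--     """
--     highest_modes = []  # list of highest-res modes for each aspect ratio
--     for monitor in monitors.keys():
--         # let's create a dict of aspect_ratio:largest_width for each
--         # display (width, because it's easier to compare simple
--         # ints when looking for the highest value).
--         top_res_per_aspect = OrderedDict()
--         for resolution in monitors[monitor]:
--             width, aspect, mode, rate = monitors[monitor][resolution]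
--             cur_max = top_res_per_aspect.get(aspect, 0)
--             top_res_per_aspect[aspect] = max(cur_max, width)
--         for aspect_ratio, max_width in reversed(
--             top_res_per_aspect.items()
--         ):
--             for resolution in monitors[monitor]:
--                 width, aspect, mode, rate = monitors[monitor][resolution]
--                 if aspect == aspect_ratio and width == max_width:
--                     highest_modes.append(
--                         (monitor, resolution, mode, rate)
--                     )
--     return highest_modes
-- ===== SOURCE B (Python) =====
-- def get_highest_resolution_info(monitors: dict) -> list:
--     """
--     Get highest resolution for each monitor
--
--     :param monitors: monitors information
--     """
--     highest_modes = []
--     for monitor, resolutions in monitors.items():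
--         # one pass: aspect -> (largest width seen (at least 0), the
--         # modes of that aspect carrying exactly that width, in order)
--         groups = {}
--         for resolution, (width, aspect, mode, rate) in resolutions.items():
--             max_width, entries = groups.get(aspect, (0, []))
--             if max_width < width:
--                 max_width, entries = width, []
--             if width == max_width:
--                 entries = entries + [(monitor, resolution, mode, rate)]
--             groups[aspect] = (max_width, entries)
--         for max_width, entries in reversed(list(groups.values())):
--             highest_modes.extend(entries)
--     return highest_modes
-- ===== Notes on version B (the rewrite author's own statement) =====
-- stated objective: alternative
-- what changed: B groups resolutions by aspect ratio in a single pass, keeping each aspect's largest width together with the already-matching modes, instead of A's full rescan of all resolutions for every aspect ratio.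
import Mathlib
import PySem

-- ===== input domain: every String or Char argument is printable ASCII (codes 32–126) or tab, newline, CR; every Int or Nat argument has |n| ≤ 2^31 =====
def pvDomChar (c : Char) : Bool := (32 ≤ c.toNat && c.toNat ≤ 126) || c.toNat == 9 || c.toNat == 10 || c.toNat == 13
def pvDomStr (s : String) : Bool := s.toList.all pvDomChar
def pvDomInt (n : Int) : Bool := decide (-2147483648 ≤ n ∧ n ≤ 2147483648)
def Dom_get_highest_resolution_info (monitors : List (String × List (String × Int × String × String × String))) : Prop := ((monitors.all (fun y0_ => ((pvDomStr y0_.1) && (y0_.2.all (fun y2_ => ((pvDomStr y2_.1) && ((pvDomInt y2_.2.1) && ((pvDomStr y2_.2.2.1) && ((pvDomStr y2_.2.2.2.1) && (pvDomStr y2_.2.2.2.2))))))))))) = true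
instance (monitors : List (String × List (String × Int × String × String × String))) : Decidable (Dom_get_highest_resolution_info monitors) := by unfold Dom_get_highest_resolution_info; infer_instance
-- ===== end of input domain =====

-- B replaces A's per-aspect rescan of all resolutions by a single grouping pass that
-- stores the matching modes while tracking each aspect's largest width (same output).
-- A mutates nothing; equivalence is about the return value.

-- ===== PORT A =====
-- inner dict of one monitor: resolution ↦ (width, aspect, mode, rate)
-- 'top_res_per_aspect' loop of A
def pvA_top (l : List (String × Int × String × String × String)) : PySem.Dict String Int :=
  l.foldl (fun d res => d.insert res.2.2.1 (max (d.getD res.2.2.1 0) res.2.1)) PySem.Dict.empty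

-- A's innermost rescan for one (aspect_ratio, max_width) pair
def pvA_inner (m : String) (l : List (String × Int × String × String × String))
    (ar : String × Int) (acc : List (String × String × String × String)) :
    List (String × String × String × String) :=
  l.foldl (fun acc2 res =>
    if res.2.2.1 == ar.1 && res.2.1 == ar.2 then
      acc2 ++ [(m, res.1, res.2.2.2.1, res.2.2.2.2)]
    else acc2) acc

def get_highest_resolution_info (monitors : List (String × List (String × Int × String × String × String))) : List (String × String × String × String) :=
  monitors.foldl (fun highest_modes monitor =>
    (pvA_top monitor.2).items.reverse.foldl
      (fun acc ar => pvA_inner monitor.1 monitor.2 ar acc) highest_modes) []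

-- ===== PORT B =====
-- B's single grouping pass: aspect ↦ (largest width seen (at least 0), stored matching modes)
def pvB_groups (m : String) (l : List (String × Int × String × String × String)) :
    PySem.Dict String (Int × List (String × String × String × String)) :=
  l.foldl (fun g res =>
    let cur := g.getD res.2.2.1 (0, [])
    let cur2 := if cur.1 < res.2.1 then (res.2.1, ([] : List (String × String × String × String))) else cur
    let entries := if res.2.1 = cur2.1 then cur2.2 ++ [(m, res.1, res.2.2.2.1, res.2.2.2.2)] else cur2.2
    g.insert res.2.2.1 (cur2.1, entries)) PySem.Dict.empty

def get_highest_resolution_info_alt (monitors : List (String × List (String × Int × String × String × String))) : List (String × String × String × String) :=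
  monitors.foldl (fun highest_modes monitor =>
    (pvB_groups monitor.1 monitor.2).items.reverse.foldl
      (fun acc p => acc ++ p.2.2) highest_modes) []

-- ===== PRECONDITION & SPEC =====
def Spec_get_highest_resolution_info (monitors : List (String × List (String × Int × String × String × String))) (out : List (String × String × String × String)) : Prop := out = get_highest_resolution_info_alt monitors
instance (monitors : List (String × List (String × Int × String × String × String))) (out : List (String × String × String × String)) : Decidable (Spec_get_highest_resolution_info monitors out) := by unfold Spec_get_highest_resolution_info; infer_instance

-- ===== CLAIM (what is proved, stated in full; the proofs are below) =====
def Claim_equal_get_highest_resolution_info : Prop := ∀ (monitors : List (String × List (String × Int × String × String × String))), Dom_get_highest_resolution_info monitors → Spec_get_highest_resolution_info monitors (get_highest_resolution_info monitors)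

-- ===== LEMMAS AND PROOFS =====

-- the modes A emits for one (aspect, max_width) pair of one monitor
def pvEmit (m : String) (l : List (String × Int × String × String × String))
    (a : String) (mw : Int) : List (String × String × String × String) :=
  (l.filter (fun res => res.2.2.1 == a && res.2.1 == mw)).map
    (fun res => (m, res.1, res.2.2.2.1, res.2.2.2.2))

theorem pvA_inner_eq (m : String) (l : List (String × Int × String × String × String))
    (ar : String × Int) (acc : List (String × String × String × String)) :
    pvA_inner m l ar acc = acc ++ pvEmit m l ar.1 ar.2 := by
  unfold pvA_inner pvEmit
  exact PySem.List.foldl_append_if _ _ l acc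

theorem pv_get?_map {ν ν' : Type} (f : String → ν → ν') (its : List (String × ν)) (k : String) :
    (PySem.Dict.mk (its.map (fun p => (p.1, f p.1 p.2)))).get? k
      = ((PySem.Dict.mk its).get? k).map (f k) := by
  induction its with
  | nil => rfl
  | cons p rest ih =>
    obtain ⟨k0, v0⟩ := p
    simp only [List.map_cons, PySem.Dict.get?_mk_cons]
    by_cases h : (k0 == k) = true
    · have hk : k0 = k := eq_of_beq h
      subst hk; simp
    · simp [h, ih]

theorem pvEmit_append (m : String) (l : List (String × Int × String × String × String))
    (x : String × Int × String × String × String) (a : String) (mw : Int) :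
    pvEmit m (l ++ [x]) a mw
      = pvEmit m l a mw ++
        (if x.2.2.1 == a && x.2.1 == mw then [(m, x.1, x.2.2.2.1, x.2.2.2.2)] else []) := by
  unfold pvEmit
  rw [List.filter_append, List.map_append]
  congr 1
  by_cases h : (x.2.2.1 == a && x.2.1 == mw) = true <;> simp [List.filter, h]

theorem pvEmit_nil (m : String) (l : List (String × Int × String × String × String))
    (a : String) (mw : Int) (h : ∀ res ∈ l, res.2.2.1 = a → res.2.1 ≠ mw) :
    pvEmit m l a mw = [] := by
  unfold pvEmit
  rw [List.filter_eq_nil_iff.mpr]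
  · rfl
  · intro res hres
    by_cases ha : res.2.2.1 = a
    · simp [ha, h res hres ha]
    · simp [ha]

-- the value B writes for one resolution entry, given the current group of its aspect
def pvBNew (m : String) (x : String × Int × String × String × String)
    (cur : Int × List (String × String × String × String)) :
    Int × List (String × String × String × String) :=
  let cur2 := if cur.1 < x.2.1 then (x.2.1, ([] : List (String × String × String × String))) else cur
  (cur2.1, if x.2.1 = cur2.1 then cur2.2 ++ [(m, x.1, x.2.2.2.1, x.2.2.2.2)] else cur2.2)

theorem pvA_top_append (l : List (String × Int × String × String × String))
    (x : String × Int × String × String × String) :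
    pvA_top (l ++ [x])
      = (pvA_top l).insert x.2.2.1 (max ((pvA_top l).getD x.2.2.1 0) x.2.1) := by
  unfold pvA_top; rw [List.foldl_append]; rfl

theorem pvB_groups_append (m : String) (l : List (String × Int × String × String × String))
    (x : String × Int × String × String × String) :
    pvB_groups m (l ++ [x])
      = (pvB_groups m l).insert x.2.2.1
          (pvBNew m x ((pvB_groups m l).getD x.2.2.1 (0, []))) := by
  unfold pvB_groups pvBNew; rw [List.foldl_append]; rfl

theorem pv_invariant (m : String) (l : List (String × Int × String × String × String)) :
    (pvB_groups m l).items
        = (pvA_top l).items.map (fun p => (p.1, (p.2, pvEmit m l p.1 p.2)))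
      ∧ (∀ res ∈ l, res.2.1 ≤ (pvA_top l).getD res.2.2.1 0)
      ∧ (∀ res ∈ l, res.2.2.1 ∈ (pvA_top l).keys) := by
  induction l using List.reverseRecOn with
  | nil => exact ⟨rfl, by simp, by simp⟩
  | append_singleton l x ih =>
    obtain ⟨hitems, hbound, hkeys⟩ := ih
    obtain ⟨rk, w, a, mo, ra⟩ := x
    have hget : ∀ k, (pvB_groups m l).get? k
        = ((pvA_top l).get? k).map (fun v => (v, pvEmit m l k v)) := by
      intro k
      have h2 := pv_get?_map (fun a v => (v, pvEmit m l a v)) (pvA_top l).items k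
      rw [← hitems] at h2
      exact h2
    rw [pvA_top_append, pvB_groups_append]
    refine ⟨?_, ?_, ?_⟩
    · -- items correspondence
      rcases hc : (pvA_top l).get? a with _ | mw
      · -- fresh aspect
        have hnk : a ∉ (pvA_top l).keys :=
          (PySem.Dict.get?_eq_none_iff_not_mem_keys _ _).mp hc
        have hna : ∀ res ∈ l, res.2.2.1 ≠ a := by
          intro res hres heq
          exact hnk (heq ▸ hkeys res hres)
        have hctop : (pvA_top l).contains a = false := by
          rw [PySem.Dict.contains_eq_isSome_get?, hc]; rfl
        have hcgrp : (pvB_groups m l).contains a = false := by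
          rw [PySem.Dict.contains_eq_isSome_get?, hget a, hc]; rfl
        have hgd : (pvA_top l).getD a 0 = 0 := by
          rw [PySem.Dict.getD_eq_get?_getD, hc]; rfl
        have hgd' : (pvB_groups m l).getD a (0, []) = (0, []) := by
          rw [PySem.Dict.getD_eq_get?_getD, hget a, hc]; rfl
        have hemit : ∀ mw', pvEmit m l a mw' = [] := fun mw' =>
          pvEmit_nil m l a mw' (fun res hres h1 => absurd h1 (hna res hres))
        rw [PySem.Dict.items_insert_of_not_contains _ _ hctop,
            PySem.Dict.items_insert_of_not_contains _ _ hcgrp, hitems,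
            List.map_append]
        congr 1
        · -- old entries unchanged
          apply List.map_congr_left
          intro p hp
          have hpa : p.1 ≠ a := by
            intro h; exact hnk (h ▸ PySem.Dict.mem_keys_of_mem_items _ hp)
          rw [pvEmit_append]
          simp [beq_eq_false_iff_ne.mpr (Ne.symm hpa)]
        · -- the new entry
          rw [hgd, hgd']
          simp only [List.map_cons, List.map_nil]
          rcases lt_trichotomy w 0 with hw | hw | hw
          · rw [show max (0 : Int) w = 0 from max_eq_left (le_of_lt hw)]
            rw [pvEmit_append, hemit 0]
            simp only [pvBNew]
            rw [if_neg (show ¬ (0:Int) < w by omega)]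
            rw [if_neg (show w ≠ ((0:Int), ([] : List (String × String × String × String))).1 by simp; omega),
]
            simp [show w ≠ (0:Int) by omega]
          · subst hw
            rw [show max (0 : Int) 0 = 0 from max_self 0]
            rw [pvEmit_append, hemit 0]
            simp [pvBNew]
          · rw [show max (0 : Int) w = w from max_eq_right (le_of_lt hw)]
            rw [pvEmit_append, hemit w]
            simp [pvBNew, hw]
      · -- existing aspect
        have hgd : (pvA_top l).getD a 0 = mw := by
          rw [PySem.Dict.getD_eq_get?_getD, hc]; rfl
        have hgd' : (pvB_groups m l).getD a (0, []) = (mw, pvEmit m l a mw) := by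
          rw [PySem.Dict.getD_eq_get?_getD, hget a, hc]; rfl
        have hctop : (pvA_top l).contains a = true := by
          rw [PySem.Dict.contains_eq_isSome_get?, hc]; rfl
        have hcgrp : (pvB_groups m l).contains a = true := by
          rw [PySem.Dict.contains_eq_isSome_get?, hget a, hc]; rfl
        have hbnd : ∀ res ∈ l, res.2.2.1 = a → res.2.1 ≤ mw := by
          intro res hres h1
          have h2 := hbound res hres
          rw [h1, hgd] at h2
          exact h2
        rw [PySem.Dict.items_insert_of_contains _ _ hctop,
            PySem.Dict.items_insert_of_contains _ _ hcgrp, hitems,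
            List.map_map, List.map_map, hgd, hgd']
        apply List.map_congr_left
        intro p hp
        by_cases hpa : p.1 = a
        · simp only [Function.comp_def, hpa, beq_self_eq_true, if_true]
          rcases lt_trichotomy mw w with hw | hw | hw
          · rw [show max mw w = w from max_eq_right (le_of_lt hw)]
            rw [pvEmit_append,
                pvEmit_nil m l a w (fun res hres h1 => by have := hbnd res hres h1; omega)]
            simp [pvBNew, hw]
          · subst hw
            rw [show max mw mw = mw from max_self mw, pvEmit_append]
            simp [pvBNew]
          · rw [show max mw w = mw from max_eq_left (le_of_lt hw), pvEmit_append]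
            simp only [pvBNew]
            rw [if_neg (show ¬ mw < w by omega)]
            rw [if_neg (show w ≠ (mw, pvEmit m l a mw).1 by simp; omega),
]
            simp [show w ≠ mw by omega]
        · have hba : (p.1 == a) = false := beq_eq_false_iff_ne.mpr hpa
          simp only [Function.comp_def, hba, Bool.false_eq_true, if_false]
          rw [pvEmit_append]
          simp [beq_eq_false_iff_ne.mpr (Ne.symm hpa)]
    · -- width bound
      intro res hres
      rcases List.mem_append.mp hres with hres | hres
      · by_cases hpa : res.2.2.1 = a
        · rw [hpa, PySem.Dict.getD_insert, if_pos rfl]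
          have h2 := hbound res hres
          rw [hpa] at h2
          exact le_trans h2 (le_max_left _ _)
        · rw [PySem.Dict.getD_insert, if_neg hpa]
          exact hbound res hres
      · simp only [List.mem_singleton] at hres
        subst hres
        rw [PySem.Dict.getD_insert, if_pos rfl]
        exact le_max_right _ _
    · -- keys
      intro res hres
      rcases List.mem_append.mp hres with hres | hres
      · exact (PySem.Dict.mem_keys_insert _ _ _ _).mpr (Or.inr (hkeys res hres))
      · simp only [List.mem_singleton] at hres
        subst hres
        exact (PySem.Dict.mem_keys_insert _ _ _ _).mpr (Or.inl rfl)

-- per-monitor agreement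
theorem pv_monitor (m : String) (l : List (String × Int × String × String × String))
    (acc : List (String × String × String × String)) :
    (pvA_top l).items.reverse.foldl (fun acc ar => pvA_inner m l ar acc) acc
      = (pvB_groups m l).items.reverse.foldl (fun acc p => acc ++ p.2.2) acc := by
  have hf : (fun (acc : List (String × String × String × String)) ar => pvA_inner m l ar acc)
      = (fun acc ar => acc ++ pvEmit m l ar.1 ar.2) := by
    funext acc' ar; exact pvA_inner_eq m l ar acc'
  rw [(pv_invariant m l).1, ← List.map_reverse, List.foldl_map, hf]

theorem pv_main (monitors : List (String × List (String × Int × String × String × String)))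
    (acc : List (String × String × String × String)) :
    monitors.foldl (fun highest_modes monitor =>
        (pvA_top monitor.2).items.reverse.foldl
          (fun acc ar => pvA_inner monitor.1 monitor.2 ar acc) highest_modes) acc
      = monitors.foldl (fun highest_modes monitor =>
        (pvB_groups monitor.1 monitor.2).items.reverse.foldl
          (fun acc p => acc ++ p.2.2) highest_modes) acc := by
  induction monitors generalizing acc with
  | nil => rfl
  | cons mon rest ih =>
    simp only [List.foldl_cons]
    rw [pv_monitor mon.1 mon.2 acc]
    exact ih _

-- ===== VERDICT (by name: the statement is the Claim_ definition above) =====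
theorem get_highest_resolution_info_spec : Claim_equal_get_highest_resolution_info := by
  intro monitors _
  unfold Spec_get_highest_resolution_info get_highest_resolution_info get_highest_resolution_info_alt
  exact pv_main monitors []
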